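-- pv_equiv track=rewrite | github.com/rongma1sheng/kiro-intelligent-dev-assistant | src/brain/analyzers/regime_adaptation_analyzer.py | _calculate_regime_duration
-- ===== SOURCE A (Python) =====
-- from typing import Any, Dict, List, Optional
--
-- def _calculate_regime_duration(regime_labels: List[str]) -> int:
--     """计算当前状态持续时间
--
--     Args:
--         regime_labels: 状态标签序列
--
--     Returns:
--         持续天数
--     """
--     if not regime_labels:
--         return 0
--
--     current_regime = regime_labels[-1]
--     duration = 1
--
--     for i in range(len(regime_labels) - 2, -1, -1):
--         if regime_labels[i] == current_regime:
--             duration += 1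
--         else:
--             break
--
--     return duration
-- ===== SOURCE B (Python) =====
-- from itertools import groupby
--
--
-- def _calculate_regime_duration(regime_labels):
--     if not regime_labels:
--         return 0
--     runs = [sum(1 for _ in g) for _, g in groupby(regime_labels)]
--     return runs[-1]
-- ===== Notes on version B (the rewrite author's own statement) =====
-- stated objective: simpler
-- what changed: Replaces A's backward index scan with early break by a single forward groupby pass that materializes consecutive-run lengths and returns the last one.
import Mathlib
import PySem

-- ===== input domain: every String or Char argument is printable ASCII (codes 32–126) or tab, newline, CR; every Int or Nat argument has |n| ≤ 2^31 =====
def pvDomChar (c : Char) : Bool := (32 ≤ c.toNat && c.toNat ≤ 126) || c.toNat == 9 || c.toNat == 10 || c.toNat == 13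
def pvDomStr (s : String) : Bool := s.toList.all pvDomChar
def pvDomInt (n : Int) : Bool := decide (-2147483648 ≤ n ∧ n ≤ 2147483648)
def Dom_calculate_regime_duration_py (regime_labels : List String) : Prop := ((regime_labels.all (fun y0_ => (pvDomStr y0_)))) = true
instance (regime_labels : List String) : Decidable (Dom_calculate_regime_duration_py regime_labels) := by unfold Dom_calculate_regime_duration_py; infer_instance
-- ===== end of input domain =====

-- B replaces A's backward early-break index scan by a forward groupby pass over runs; objective: simpler.


-- ===== PORT A =====
-- 'for i in range(len-2, -1, -1)' with break, as the obvious structural recursion on the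
-- index: pvALoop l c m d handles indices m-1, m-2, …, 0 (every index accessed is in range,
-- so pyGetD is exact here).
def pvALoop (l : List String) (c : String) : Nat → Int → Int
  | 0, d => d
  | m + 1, d =>
    if PySem.List.pyGetD l (m : Int) "" == c then pvALoop l c m (d + 1) else d

def calculate_regime_duration_py (regime_labels : List String) : Int :=
  if regime_labels = [] then 0
  else
    let current := PySem.List.pyGetD regime_labels (-1) ""
    pvALoop regime_labels current (regime_labels.length - 1) 1

-- ===== PORT B =====
-- groupby(regime_labels) materialized as the list of consecutive-run lengths:
-- pvRuns xs x n = run lengths of (x-run of current length n) followed by xs.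
def pvRuns : List String → String → Int → List Int
  | [], _, n => [n]
  | y :: ys, x, n => if y == x then pvRuns ys x (n + 1) else n :: pvRuns ys y 1

def calculate_regime_duration_py_alt (regime_labels : List String) : Int :=
  match regime_labels with
  | [] => 0
  | x :: xs => PySem.List.pyGetD (pvRuns xs x 1) (-1) 0

-- ===== PRECONDITION & SPEC =====
def Spec_calculate_regime_duration_py (regime_labels : List String) (out : Int) : Prop := out = calculate_regime_duration_py_alt regime_labels
instance (regime_labels : List String) (out : Int) : Decidable (Spec_calculate_regime_duration_py regime_labels out) := by unfold Spec_calculate_regime_duration_py; infer_instance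

-- ===== CLAIM (what is proved, stated in full; the proofs are below) =====
def Claim_equal_calculate_regime_duration_py : Prop := ∀ (regime_labels : List String), Dom_calculate_regime_duration_py regime_labels → Spec_calculate_regime_duration_py regime_labels (calculate_regime_duration_py regime_labels)

-- ===== LEMMAS AND PROOFS =====

-- length of the run of c at the front of l
def cnt : List String → String → Int
  | [], _ => 0
  | a :: as, c => if a = c then 1 + cnt as c else 0

-- trailing run length of l
def trail (l : List String) : Int :=
  match l.reverse with
  | [] => 0
  | c :: rest => 1 + cnt rest c

theorem cnt_all {u : List String} {c : String} (h : ∀ a ∈ u, a = c) :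
    cnt u c = u.length := by
  induction u with
  | nil => simp [cnt]
  | cons a as ih =>
    have ha : a = c := h a (by simp)
    rw [cnt, if_pos ha, ih (fun b hb => h b (by simp [hb]))]
    simp only [List.length_cons]; push_cast; ring

theorem cnt_append (u v : List String) (c : String) :
    cnt (u ++ v) c = if ∀ a ∈ u, a = c then u.length + cnt v c else cnt u c := by
  induction u with
  | nil => simp
  | cons a as ih =>
    by_cases ha : a = c
    · by_cases has : ∀ b ∈ as, b = c
      · have h2 : ∀ b ∈ a :: as, b = c := by
          intro b hb; rcases List.mem_cons.1 hb with hb | hb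
          · exact hb ▸ ha
          · exact has b hb
        rw [List.cons_append, cnt, if_pos ha, ih, if_pos has, if_pos h2]
        simp only [List.length_cons]; push_cast; ring
      · have h2 : ¬ ∀ b ∈ a :: as, b = c := fun h =>
          has (fun b hb => h b (List.mem_cons_of_mem _ hb))
        rw [List.cons_append, cnt, if_pos ha, ih, if_neg has, if_neg h2, cnt, if_pos ha]
    · have h2 : ¬ ∀ b ∈ a :: as, b = c := fun h => ha (h a List.mem_cons_self)
      rw [List.cons_append, cnt, if_neg ha, if_neg h2, cnt, if_neg ha]

-- prepend lemma for the trailing-run length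
theorem trail_cons (x : String) (xs : List String) :
    trail (x :: xs) = if ∀ a ∈ xs, a = x then 1 + (xs.length : Int) else trail xs := by
  rcases h : xs.reverse with _ | ⟨c, rest⟩
  · have hxs : xs = [] := by simpa using congrArg List.reverse h
    simp [hxs, trail, cnt]
  · have hxs : xs = (c :: rest).reverse := by
      have := congrArg List.reverse h; simpa using this
    have hrev : (x :: xs).reverse = c :: (rest ++ [x]) := by simp [h]
    have hmemc : c ∈ xs := by rw [hxs, List.mem_reverse]; exact List.mem_cons_self
    have hmemrest : ∀ a ∈ rest, a ∈ xs := by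
      intro a ha; rw [hxs, List.mem_reverse]; exact List.mem_cons_of_mem _ ha
    have hT1 : trail (x :: xs) = 1 + cnt (rest ++ [x]) c := by rw [trail, hrev]
    have hT2 : trail xs = 1 + cnt rest c := by rw [trail, h]
    by_cases hall : ∀ a ∈ xs, a = x
    · have hcx : c = x := hall c hmemc
      have hrestc : ∀ a ∈ rest, a = c := by
        intro a ha; rw [hcx]; exact hall a (hmemrest a ha)
      have hlen : (xs.length : Int) = rest.length + 1 := by
        rw [hxs]; simp
      rw [if_pos hall, hT1, cnt_append, if_pos hrestc, cnt, if_pos hcx.symm, cnt, hlen]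
      push_cast; ring
    · rw [if_neg hall, hT1, hT2, cnt_append]
      by_cases hrestc : ∀ a ∈ rest, a = c
      · have hcx : x ≠ c := by
          intro hcx
          apply hall
          intro a ha
          have : a ∈ (c :: rest) := by
            rw [hxs, List.mem_reverse] at ha; exact ha
          rcases List.mem_cons.1 this with h1 | h1
          · rw [h1, ← hcx]
          · rw [hrestc a h1, ← hcx]
        rw [if_pos hrestc, cnt, if_neg hcx, cnt_all hrestc]
        ring
      · rw [if_neg hrestc]

theorem pvRuns_ne_nil (xs : List String) (x : String) (n : Int) : pvRuns xs x n ≠ [] := by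
  induction xs generalizing x n with
  | nil => simp [pvRuns]
  | cons y ys ih =>
    by_cases h : y = x <;> simp [pvRuns, h, ih]

theorem pvRuns_last (xs : List String) (x : String) (n : Int) :
    PySem.List.pyGetD (pvRuns xs x n) (-1) 0 =
      if ∀ a ∈ xs, a = x then n + xs.length else trail xs := by
  induction xs generalizing x n with
  | nil =>
    rw [show pvRuns [] x n = [n] from rfl,
        PySem.List.pyGetD_neg_one [n] 0 (by simp)]
    simp
  | cons y ys ih =>
    by_cases hyx : y = x
    · subst hyx
      rw [show pvRuns (y :: ys) y n = pvRuns ys y (n + 1) by simp [pvRuns], ih]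
      by_cases hall : ∀ a ∈ ys, a = y
      · have h2 : ∀ a ∈ (y :: ys), a = y := by
          intro a ha; rcases List.mem_cons.1 ha with h | h
          · exact h
          · exact hall a h
        rw [if_pos hall, if_pos h2]
        simp only [List.length_cons]; push_cast; ring
      · have h2 : ¬ ∀ a ∈ (y :: ys), a = y := fun h =>
          hall (fun a ha => h a (List.mem_cons_of_mem _ ha))
        rw [if_neg hall, if_neg h2, trail_cons, if_neg hall]
    · rw [show pvRuns (y :: ys) x n = n :: pvRuns ys y 1 by simp [pvRuns, hyx]]
      have hne := pvRuns_ne_nil ys y 1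
      have h2 : ¬ ∀ a ∈ (y :: ys), a = x := fun h => hyx (h y List.mem_cons_self)
      rw [PySem.List.pyGetD_neg_one _ 0 (List.cons_ne_nil n _), List.getLast_cons hne,
          ← PySem.List.pyGetD_neg_one _ 0 hne, ih, if_neg h2, trail_cons]

theorem pvALoop_eq (l : List String) (c : String) :
    ∀ (m : Nat), m ≤ l.length → ∀ d, pvALoop l c m d = d + cnt ((l.take m).reverse) c := by
  intro m
  induction m with
  | zero => intro _ d; simp [pvALoop, cnt]
  | succ m ih =>
    intro hm d
    have hmlt : m < l.length := by omega
    have hget : PySem.List.pyGetD l (m : Int) "" = l[m] := by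
      rw [PySem.List.pyGetD_natCast]
      exact List.getD_eq_getElem l "" hmlt
    have htake : (l.take (m + 1)).reverse = l[m] :: (l.take m).reverse := by
      rw [List.take_add_one]
      simp [List.getElem?_eq_getElem hmlt]
    rw [htake]
    by_cases hc : l[m] = c
    · rw [pvALoop, hget, if_pos (by simp [hc]), ih (by omega), cnt, if_pos hc]
      ring
    · rw [pvALoop, hget, if_neg (by simp [hc]), cnt, if_neg hc]
      ring

theorem trail_eq_A (l : List String) (h : l ≠ []) :
    calculate_regime_duration_py l = trail l := by
  have hlast : PySem.List.pyGetD l (-1) "" = l.getLast h :=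
    PySem.List.pyGetD_neg_one l "" h
  have hdrop : l.dropLast ++ [l.getLast h] = l := List.dropLast_append_getLast h
  have hrev : l.reverse = l.getLast h :: l.dropLast.reverse := by
    conv_lhs => rw [← hdrop]
    simp
  have htake : l.take (l.length - 1) = l.dropLast := List.dropLast_eq_take.symm
  unfold calculate_regime_duration_py
  rw [if_neg h]
  simp only [hlast]
  rw [pvALoop_eq l (l.getLast h) (l.length - 1) (by omega) 1, htake, trail, hrev]

-- ===== VERDICT (by name: the statement is the Claim_ definition above) =====
theorem calculate_regime_duration_py_spec : Claim_equal_calculate_regime_duration_py := by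
  intro l _
  unfold Spec_calculate_regime_duration_py
  rcases l with _ | ⟨x, xs⟩
  · simp [calculate_regime_duration_py, calculate_regime_duration_py_alt]
  · rw [trail_eq_A (x :: xs) (by simp)]
    show trail (x :: xs) = calculate_regime_duration_py_alt (x :: xs)
    rw [calculate_regime_duration_py_alt, pvRuns_last, trail_cons]
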